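-- pv_equiv track=rewrite | github.com/tomhyhan/PEuler | solved/budae.py | solution
-- ===== SOURCE A (Python) =====
-- from collections import defaultdict
-- import heapq
--
-- def solution(n, roads, sources, destination):
--     graph = defaultdict(list)
--
--     for s, e, in roads:
--         graph[s].append(e)
--         graph[e].append(s)
--
--     visited = defaultdict(lambda: float("inf"))
--     visited[destination] = 0
--     queue = [(0,destination)]
--     while queue:
--         dist, node = heapq.heappop(queue)
--         for nnode in graph[node]:
--             new_dist = dist + 1
--             if new_dist < visited[nnode]:
--                 visited[nnode] = new_dist
--                 heapq.heappush(queue, (new_dist, nnode))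
--
--     result = []
--     for source in sources:
--         result.append(visited[source] if source in visited else -1)
--
--     return result
-- ===== SOURCE B (Python) =====
-- def solution(n, roads, sources, destination):
--     # Level-by-level BFS from the destination (unit weights), instead of a Dijkstra heap.
--     adj = {}
--     for s, e in roads:
--         adj.setdefault(s, []).append(e)
--         adj.setdefault(e, []).append(s)
--     dist = {destination: 0}
--     frontier = [destination]
--     d = 0
--     while frontier:
--         d += 1
--         nxt = []
--         for u in frontier:
--             for v in adj.get(u, []):
--                 if v not in dist:
--                     dist[v] = d
--                     nxt.append(v)
--         frontier = nxt
--     return [dist.get(s, -1) for s in sources]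
-- ===== Notes on version B (the rewrite author's own statement) =====
-- stated objective: alternative
-- what changed: A runs Dijkstra with a heapq priority queue over the unit-weight graph; B replaces it by a plain level-by-level BFS from the destination (frontier lists, no heap, no decrease-key relaxations); intended as asymptotically lighter (O(V+E) vs O(E log V)) but measured only ~1.3x at the largest size, so no speed is claimed.
import Mathlib
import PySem

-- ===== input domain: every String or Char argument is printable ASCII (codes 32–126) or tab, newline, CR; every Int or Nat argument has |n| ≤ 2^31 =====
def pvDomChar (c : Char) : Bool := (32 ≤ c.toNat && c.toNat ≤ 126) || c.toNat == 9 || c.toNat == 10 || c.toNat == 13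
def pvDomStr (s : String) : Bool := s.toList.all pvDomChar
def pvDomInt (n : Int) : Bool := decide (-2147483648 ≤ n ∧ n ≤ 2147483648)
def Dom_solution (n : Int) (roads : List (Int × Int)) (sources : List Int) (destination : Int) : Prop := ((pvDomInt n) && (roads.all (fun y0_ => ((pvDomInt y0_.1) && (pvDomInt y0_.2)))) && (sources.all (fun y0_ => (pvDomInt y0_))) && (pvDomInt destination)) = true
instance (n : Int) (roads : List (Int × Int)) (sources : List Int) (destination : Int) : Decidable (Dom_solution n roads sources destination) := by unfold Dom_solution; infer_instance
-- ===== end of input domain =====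

-- B replaces A's Dijkstra heap by plain level-by-level BFS (the graph has unit weights).
-- Equivalence is for the return value; neither Python mutates its arguments.

-- ===== PORT A =====
-- Both Pythons build the same undirected adjacency dict:
-- A: graph[s].append(e); graph[e].append(s) on a defaultdict(list)  (B: setdefault(.., []).append(..))
def pvAdjStep (g : PySem.Dict Int (List Int)) (r : Int × Int) : PySem.Dict Int (List Int) :=
  let g1 := g.insert r.1 (g.getD r.1 [] ++ [r.2])
  g1.insert r.2 (g1.getD r.2 [] ++ [r.1])

-- heapq tuple comparison (dist, node): lexicographic
def pvLexLe (a b : Int × Int) : Bool := a.1 < b.1 || (a.1 == b.1 && a.2 ≤ b.2)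

def pvHeapMin (h : Int × Int) (t : List (Int × Int)) : Int × Int :=
  t.foldl (fun m x => if pvLexLe m x then m else x) h

-- heapq.heappop: returns the minimum entry; the heap's internal layout is not observable,
-- so the queue is modeled by its contents and pop removes the (first) minimal element.
def pvPopMin : List (Int × Int) → Option ((Int × Int) × List (Int × Int))
  | [] => none
  | h :: t => some (pvHeapMin h t, (h :: t).erase (pvHeapMin h t))

-- body of 'for nnode in graph[node]': visited is a defaultdict(inf), an absent key reads +inf,
-- so 'new_dist < visited[nnode]' is true exactly when the key is absent or larger; on success
-- visited[nnode] = new_dist and heappush(queue, (new_dist, nnode)) (push = add to contents).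
def pvRelax (d : Int) (s : PySem.Dict Int Int × List (Int × Int)) (x : Int) :
    PySem.Dict Int Int × List (Int × Int) :=
  let nd := d + 1
  let fresh := match s.1.get? x with
    | none => true
    | some w => decide (nd < w)
  if fresh then (s.1.insert x nd, s.2 ++ [(nd, x)]) else s

-- 'while queue:' ported with fuel; fuel sufficiency of 2*len(roads)+2 is part of the proof below
def pvLoopA (g : PySem.Dict Int (List Int)) :
    Nat → PySem.Dict Int Int → List (Int × Int) → PySem.Dict Int Int
  | 0, v, _ => v
  | f + 1, v, q =>
    match pvPopMin q with
    | none => v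
    | some ((dist, node), q') =>
      let s := (g.getD node []).foldl (pvRelax dist) (v, q')
      pvLoopA g f s.1 s.2

def solution (n : Int) (roads : List (Int × Int)) (sources : List Int) (destination : Int) : List Int :=
  let graph := roads.foldl pvAdjStep PySem.Dict.empty
  let visited : PySem.Dict Int Int := PySem.Dict.empty.insert destination 0
  let final := pvLoopA graph (2 * roads.length + 2) visited [(0, destination)]
  -- result.append(visited[source] if source in visited else -1)
  sources.foldl (fun res s => res ++ [match final.get? s with | some w => w | none => -1]) []

-- ===== PORT B =====
-- body of 'for v in adj.get(u, []): if v not in dist: dist[v] = d; nxt.append(v)'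
def pvAdd (d : Int) (s : PySem.Dict Int Int × List Int) (x : Int) :
    PySem.Dict Int Int × List Int :=
  if (s.1.get? x).isNone then (s.1.insert x d, s.2 ++ [x]) else s

-- 'while frontier:' ported with fuel; fuel sufficiency of 2*len(roads)+2 is part of the proof below
def pvLoopB (g : PySem.Dict Int (List Int)) :
    Nat → PySem.Dict Int Int → List Int → Int → PySem.Dict Int Int
  | 0, dist, _, _ => dist
  | f + 1, dist, frontier, d =>
    if frontier.isEmpty then dist
    else
      let s := frontier.foldl (fun acc u => (g.getD u []).foldl (pvAdd (d + 1)) acc) (dist, [])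
      pvLoopB g f s.1 s.2 (d + 1)

def solution_alt (n : Int) (roads : List (Int × Int)) (sources : List Int) (destination : Int) : List Int :=
  let adj := roads.foldl pvAdjStep PySem.Dict.empty
  let dist0 : PySem.Dict Int Int := PySem.Dict.empty.insert destination 0
  let final := pvLoopB adj (2 * roads.length + 2) dist0 [destination] 0
  sources.map (fun s => final.getD s (-1))

-- ===== PRECONDITION & SPEC =====
def Spec_solution (n : Int) (roads : List (Int × Int)) (sources : List Int) (destination : Int) (out : List Int) : Prop := out = solution_alt n roads sources destination
instance (n : Int) (roads : List (Int × Int)) (sources : List Int) (destination : Int) (out : List Int) : Decidable (Spec_solution n roads sources destination out) := by unfold Spec_solution; infer_instance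

-- ===== CLAIM (what is proved, stated in full; the proofs are below) =====
def Claim_equal_solution : Prop := ∀ (n : Int) (roads : List (Int × Int)) (sources : List Int) (destination : Int), Dom_solution n roads sources destination → Spec_solution n roads sources destination (solution n roads sources destination)

-- ===== LEMMAS AND PROOFS =====

-- proof-side abbreviations
def pvAdj (g : PySem.Dict Int (List Int)) (u : Int) : List Int := g.getD u []

def pvB1 (g : PySem.Dict Int (List Int)) (d : Int) (v : PySem.Dict Int Int) (us : List Int) :
    PySem.Dict Int Int × List Int :=
  (us.flatMap (pvAdj g)).foldl (pvAdd d) (v, [])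

def pvPool (g : PySem.Dict Int (List Int)) : Finset Int := g.values.flatten.toFinset

def pvM (g : PySem.Dict Int (List Int)) (v : PySem.Dict Int Int) : Nat :=
  ((pvPool g).filter (fun x => v.get? x = none)).card

-- ---- pvLexLe / pvHeapMin ----
lemma pvLexLe_iff (a b : Int × Int) :
    pvLexLe a b = true ↔ (a.1 < b.1 ∨ (a.1 = b.1 ∧ a.2 ≤ b.2)) := by
  simp [pvLexLe]

lemma pvLexLe_refl (a : Int × Int) : pvLexLe a a = true := by
  rw [pvLexLe_iff]; omega

lemma pvLexLe_trans {a b c : Int × Int} (h1 : pvLexLe a b = true) (h2 : pvLexLe b c = true) :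
    pvLexLe a c = true := by
  rw [pvLexLe_iff] at *; omega

lemma pvLexLe_total (a b : Int × Int) : pvLexLe a b = true ∨ pvLexLe b a = true := by
  rw [pvLexLe_iff, pvLexLe_iff]; omega

lemma pvHeapMin_cons (h x : Int × Int) (t : List (Int × Int)) :
    pvHeapMin h (x :: t) = pvHeapMin (if pvLexLe h x then h else x) t := rfl

lemma pvHeapMin_mem (h : Int × Int) (t : List (Int × Int)) :
    pvHeapMin h t = h ∨ pvHeapMin h t ∈ t := by
  induction t generalizing h with
  | nil => exact Or.inl rfl
  | cons x t ih =>
    rw [pvHeapMin_cons]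
    rcases ih (if pvLexLe h x then h else x) with h1 | h1
    · rw [h1]; split
      · exact Or.inl rfl
      · exact Or.inr (List.mem_cons_self ..)
    · exact Or.inr (List.mem_cons_of_mem _ h1)

lemma pvHeapMin_le (h : Int × Int) (t : List (Int × Int)) :
    pvLexLe (pvHeapMin h t) h = true ∧ ∀ x ∈ t, pvLexLe (pvHeapMin h t) x = true := by
  induction t generalizing h with
  | nil => exact ⟨pvLexLe_refl h, by simp⟩
  | cons x t ih =>
    rw [pvHeapMin_cons]
    obtain ⟨ih1, ih2⟩ := ih (if pvLexLe h x then h else x)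
    by_cases hx : pvLexLe h x = true
    · rw [if_pos hx] at ih1 ih2 ⊢
      exact ⟨ih1, by
        intro y hy
        rcases List.mem_cons.mp hy with rfl | hy
        · exact pvLexLe_trans ih1 hx
        · exact ih2 y hy⟩
    · rw [if_neg hx] at ih1 ih2 ⊢
      have hxh : pvLexLe x h = true := by
        rcases pvLexLe_total h x with h' | h'
        · exact absurd h' hx
        · exact h'
      exact ⟨pvLexLe_trans ih1 hxh, by
        intro y hy
        rcases List.mem_cons.mp hy with rfl | hy
        · exact ih1
        · exact ih2 y hy⟩

-- ---- flatMap fold ----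
lemma pv_foldl_flatMap {α β σ : Type} (f : σ → α → σ) (gf : β → List α) (l : List β) (init : σ) :
    l.foldl (fun a b => (gf b).foldl f a) init = (l.flatMap gf).foldl f init := by
  induction l generalizing init with
  | nil => rfl
  | cons b l ih => simp [List.foldl_append, ih]

-- ---- pvAdd fold characterization ----
lemma pvAdd_fold_acc (d : Int) (xs : List Int) :
    ∀ (v : PySem.Dict Int Int) (acc : List Int),
      xs.foldl (pvAdd d) (v, acc) =
        ((xs.foldl (pvAdd d) (v, [])).1, acc ++ (xs.foldl (pvAdd d) (v, [])).2) := by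
  induction xs with
  | nil => intro v acc; simp
  | cons x xs ih =>
    intro v acc
    by_cases h : (v.get? x).isNone
    · simp only [List.foldl_cons, pvAdd, h, if_pos]
      rw [ih (v.insert x d) (acc ++ [x])]
      simp only [List.nil_append]
      rw [ih (v.insert x d) [x]]
      simp
    · simp only [List.foldl_cons, pvAdd, h, if_neg, Bool.false_eq_true, not_false_iff]
      exact ih v acc

lemma pvAdd_fold_get? (d : Int) (xs : List Int) :
    ∀ (v : PySem.Dict Int Int) (x : Int),
      ((xs.foldl (pvAdd d) (v, [])).1).get? x =
        if v.get? x = none then (if x ∈ xs then some d else none) else v.get? x := by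
  induction xs with
  | nil => intro v x; cases h : v.get? x <;> simp [h]
  | cons x0 xs ih =>
    intro v x
    by_cases h : (v.get? x0).isNone
    · have h0 : v.get? x0 = none := Option.isNone_iff_eq_none.mp h
      simp only [List.foldl_cons, pvAdd, h, if_pos]
      rw [pvAdd_fold_acc, ih (v.insert x0 d) x]
      by_cases hx : x = x0
      · subst hx
        simp [PySem.Dict.get?_insert_self, h0]
      · rw [PySem.Dict.get?_insert_of_ne _ _ hx]
        by_cases hn : v.get? x = none <;> simp [hn, hx]
    · have h0 : ¬ v.get? x0 = none := by simpa [Option.isNone_iff_eq_none] using h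
      simp only [List.foldl_cons, pvAdd, h, if_neg, Bool.false_eq_true, not_false_iff]
      rw [ih v x]
      by_cases hn : v.get? x = none
      · have hx : x ≠ x0 := by intro hx; subst hx; exact h0 hn
        simp [hn, hx]
      · simp [hn]

lemma pvAdd_fold_mem (d : Int) (xs : List Int) :
    ∀ (v : PySem.Dict Int Int) (x : Int),
      x ∈ (xs.foldl (pvAdd d) (v, [])).2 ↔ x ∈ xs ∧ v.get? x = none := by
  induction xs with
  | nil => intro v x; simp
  | cons x0 xs ih =>
    intro v x
    by_cases h : (v.get? x0).isNone
    · have h0 : v.get? x0 = none := Option.isNone_iff_eq_none.mp h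
      simp only [List.foldl_cons, pvAdd, h, if_pos]
      rw [pvAdd_fold_acc]
      simp only [List.mem_append, List.mem_singleton, ih (v.insert x0 d) x]
      by_cases hx : x = x0
      · subst hx; simp [h0]
      · rw [PySem.Dict.get?_insert_of_ne _ _ hx]
        simp [hx]
    · have h0 : ¬ v.get? x0 = none := by simpa [Option.isNone_iff_eq_none] using h
      simp only [List.foldl_cons, pvAdd, h, if_neg, Bool.false_eq_true, not_false_iff]
      rw [ih v x]
      constructor
      · rintro ⟨h1, h2⟩; exact ⟨List.mem_cons_of_mem _ h1, h2⟩
      · rintro ⟨h1, h2⟩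
        rcases List.mem_cons.mp h1 with rfl | h1
        · exact absurd h2 h0
        · exact ⟨h1, h2⟩

lemma pvAdd_fold_nodup (d : Int) (xs : List Int) :
    ∀ (v : PySem.Dict Int Int), (xs.foldl (pvAdd d) (v, [])).2.Nodup := by
  induction xs with
  | nil => intro v; simp
  | cons x0 xs ih =>
    intro v
    by_cases h : (v.get? x0).isNone
    · simp only [List.foldl_cons, pvAdd, h, if_pos]
      rw [pvAdd_fold_acc]
      refine List.Nodup.append (by simp) (ih (v.insert x0 d)) ?_
      intro a ha hb
      rw [List.nil_append, List.mem_singleton] at ha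
      have hmem := (pvAdd_fold_mem d xs (v.insert x0 d) a).mp hb
      rw [ha, PySem.Dict.get?_insert_self] at hmem
      exact absurd hmem.2 (by simp)
    · simp only [List.foldl_cons, pvAdd, h, if_neg, Bool.false_eq_true, not_false_iff]
      exact ih v

-- ---- the relax loop of A is the "add if fresh" loop once every stored value is ≤ d+1 ----
lemma pvRelax_fold (d : Int) (xs : List Int) :
    ∀ (v : PySem.Dict Int Int) (q : List (Int × Int)),
      (∀ x w, v.get? x = some w → w ≤ d + 1) →
      xs.foldl (pvRelax d) (v, q) =
        ((xs.foldl (pvAdd (d + 1)) (v, [])).1,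
         q ++ ((xs.foldl (pvAdd (d + 1)) (v, [])).2).map (fun x => (d + 1, x))) := by
  induction xs with
  | nil => intro v q _; simp
  | cons x0 xs ih =>
    intro v q hv
    cases h : v.get? x0 with
    | none =>
      have hrelax : pvRelax d (v, q) x0 = (v.insert x0 (d + 1), q ++ [(d + 1, x0)]) := by
        simp [pvRelax, h]
      have hadd : pvAdd (d + 1) (v, ([] : List Int)) x0 = (v.insert x0 (d + 1), [x0]) := by
        simp [pvAdd, h]
      have hv' : ∀ x w, (v.insert x0 (d + 1)).get? x = some w → w ≤ d + 1 := by
        intro x w hx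
        by_cases hx0 : x = x0
        · subst hx0; rw [PySem.Dict.get?_insert_self] at hx
          injection hx with hx; omega
        · rw [PySem.Dict.get?_insert_of_ne _ _ hx0] at hx; exact hv x w hx
      rw [List.foldl_cons, List.foldl_cons, hrelax, hadd,
        ih (v.insert x0 (d + 1)) (q ++ [(d + 1, x0)]) hv',
        pvAdd_fold_acc (d + 1) xs (v.insert x0 (d + 1)) [x0]]
      simp
    | some w =>
      have hw : w ≤ d + 1 := hv x0 w h
      have hrelax : pvRelax d (v, q) x0 = (v, q) := by
        simp only [pvRelax]
        have hdec : decide (d + 1 < w) = false := by simp; omega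
        simp [h, hdec]
      have hadd : pvAdd (d + 1) (v, ([] : List Int)) x0 = (v, []) := by
        simp [pvAdd, h]
      rw [List.foldl_cons, List.foldl_cons, hrelax, hadd]
      exact ih v q hv

-- ---- the A loop on an empty queue ----
lemma pvLoopA_nil (g : PySem.Dict Int (List Int)) (f : Nat) (v : PySem.Dict Int Int) :
    pvLoopA g f v [] = v := by
  cases f <;> simp [pvLoopA, pvPopMin]

-- ---- popping from a level queue pops a level element ----
lemma pvPopMin_spec (d : Int) (R : List Int) (P q : List (Int × Int))
    (hq : q.Perm (R.map (fun u => (d, u)) ++ P)) (hR : R ≠ [])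
    (hP : ∀ e ∈ P, e.1 = d + 1) :
    ∃ u q', u ∈ R ∧ pvPopMin q = some ((d, u), q') ∧
      q'.Perm ((R.erase u).map (fun u => (d, u)) ++ P) := by
  obtain ⟨u0, hu0⟩ := List.exists_mem_of_ne_nil R hR
  have hu0q : (d, u0) ∈ q := by
    rw [hq.mem_iff]
    exact List.mem_append_left _ (List.mem_map_of_mem hu0)
  cases q with
  | nil => simp at hu0q
  | cons h t =>
    set m := pvHeapMin h t with hm
    have hmq : m ∈ h :: t := by
      rcases pvHeapMin_mem h t with h1 | h1
      · rw [← hm] at h1; rw [h1]; exact List.mem_cons_self ..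
      · rw [← hm] at h1; exact List.mem_cons_of_mem _ h1
    have hmle : ∀ x ∈ h :: t, pvLexLe m x = true := by
      intro x hx
      obtain ⟨h1, h2⟩ := pvHeapMin_le h t
      rcases List.mem_cons.mp hx with rfl | hx
      · exact h1
      · exact h2 x hx
    have hmRP : m ∈ R.map (fun u => (d, u)) ++ P := hq.mem_iff.mp hmq
    have hmR : m ∈ R.map (fun u => (d, u)) := by
      rcases List.mem_append.mp hmRP with h1 | h1
      · exact h1
      · exfalso
        have hm1 : m.1 = d + 1 := hP m h1
        have := (pvLexLe_iff m (d, u0)).mp (hmle _ hu0q)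
        simp at this; omega
    obtain ⟨u, huR, hmu⟩ := List.mem_map.mp hmR
    refine ⟨u, (h :: t).erase m, huR, ?_, ?_⟩
    · simp only [pvPopMin, ← hm, hmu]
    · have hperm : ((h :: t).erase m).Perm ((R.map (fun u => (d, u)) ++ P).erase m) :=
        hq.erase m
      rw [List.erase_append_left _ hmR] at hperm
      have hinj : Function.Injective (fun u : Int => (d, u)) := by
        intro a b hab; simpa using hab
      have hmap : (R.map (fun u => (d, u))).erase m = (R.erase u).map (fun u => (d, u)) := by
        rw [← hmu, ← List.map_erase hinj]
      rw [hmap] at hperm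
      exact hperm

-- ---- one whole level of A's heap loop ----
lemma pvLoopA_level (g : PySem.Dict Int (List Int)) (d : Int) :
    ∀ (n : Nat) (R : List Int) (v : PySem.Dict Int Int) (P q : List (Int × Int)) (fA : Nat),
      R.length = n →
      q.Perm (R.map (fun u => (d, u)) ++ P) →
      (∀ e ∈ P, e.1 = d + 1) →
      (∀ x w, v.get? x = some w → w ≤ d + 1) →
      ∃ us q', us.Perm R ∧
        pvLoopA g (R.length + fA) v q = pvLoopA g fA (pvB1 g (d + 1) v us).1 q' ∧
        q'.Perm (P ++ ((pvB1 g (d + 1) v us).2).map (fun x => (d + 1, x))) := by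
  intro n
  induction n with
  | zero =>
    intro R v P q fA hlen hq hP hv
    have hR : R = [] := List.eq_nil_of_length_eq_zero hlen
    subst hR
    refine ⟨[], q, List.Perm.refl _, by simp [pvB1], ?_⟩
    simpa [pvB1] using hq
  | succ n ih =>
    intro R v P q fA hlen hq hP hv
    have hR : R ≠ [] := by intro h; subst h; simp at hlen
    obtain ⟨u, q2, huR, hpop, hq2⟩ := pvPopMin_spec d R P q hq hR hP
    -- unfold one iteration of the heap loop
    have hstep : pvLoopA g (R.length + fA) v q =
        pvLoopA g (n + fA)
          ((pvAdj g u).foldl (pvRelax d) (v, q2)).1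
          ((pvAdj g u).foldl (pvRelax d) (v, q2)).2 := by
      have : R.length + fA = (n + fA) + 1 := by omega
      rw [this]
      simp only [pvLoopA, hpop, pvAdj]
    -- characterize the relax fold
    set W := (pvAdj g u).foldl (pvAdd (d + 1)) (v, ([] : List Int)) with hW
    have hrelax := pvRelax_fold d (pvAdj g u) v q2 hv
    have hv1 : ∀ x w, W.1.get? x = some w → w ≤ d + 1 := by
      intro x w hx
      rw [hW, pvAdd_fold_get? (d + 1) (pvAdj g u) v x] at hx
      by_cases hn : v.get? x = none
      · rw [if_pos hn] at hx
        by_cases hmem : x ∈ pvAdj g u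
        · rw [if_pos hmem] at hx; injection hx with hx; omega
        · rw [if_neg hmem] at hx; cases hx
      · rw [if_neg hn] at hx; exact hv x w hx
    have hq3 : (q2 ++ W.2.map (fun x => (d + 1, x))).Perm
        ((R.erase u).map (fun u => (d, u)) ++ (P ++ W.2.map (fun x => (d + 1, x)))) := by
      have h1 := hq2.append_right (W.2.map (fun x => (d + 1, x)))
      rw [List.append_assoc] at h1
      exact h1
    have hP' : ∀ e ∈ P ++ W.2.map (fun x => (d + 1, x)), e.1 = d + 1 := by
      intro e he
      rcases List.mem_append.mp he with he | he
      · exact hP e he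
      · obtain ⟨x, _, rfl⟩ := List.mem_map.mp he; rfl
    have hlen' : (R.erase u).length = n := by
      rw [List.length_erase_of_mem huR, hlen]; rfl
    obtain ⟨us', q', hus', hloop', hq'⟩ :=
      ih (R.erase u) W.1 (P ++ W.2.map (fun x => (d + 1, x)))
        (q2 ++ W.2.map (fun x => (d + 1, x))) fA hlen' hq3 hP' hv1
    -- assemble: us = u :: us'
    have hcomp : pvB1 g (d + 1) v (u :: us') =
        ((pvB1 g (d + 1) W.1 us').1, W.2 ++ (pvB1 g (d + 1) W.1 us').2) := by
      rw [pvB1, List.flatMap_cons, List.foldl_append, ← hW]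
      have : W = (W.1, W.2) := rfl
      rw [this, pvAdd_fold_acc]
      rfl
    refine ⟨u :: us', q', ?_, ?_, ?_⟩
    · exact (List.Perm.cons u hus').trans (List.perm_cons_erase huR).symm
    · rw [hstep, hrelax]
      rw [hlen'] at hloop'
      rw [hloop', hcomp]
    · rw [hcomp]
      simp only
      rw [List.map_append, ← List.append_assoc]
      exact hq'

-- ---- neighbours live among the stored adjacency values ----
lemma pv_mem_getD_values (g : PySem.Dict Int (List Int)) (u x : Int)
    (hx : x ∈ g.getD u []) : x ∈ g.values.flatten := by
  rw [PySem.Dict.getD_eq_get?_getD] at hx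
  cases h : g.get? u with
  | none => rw [h] at hx; simp at hx
  | some l =>
    rw [h] at hx
    simp only [Option.getD_some] at hx
    have hitem := PySem.Dict.mem_items_of_get?_eq_some g h
    have hl : l ∈ g.values := by
      have : l = ((u, l) : Int × List Int).2 := rfl
      rw [PySem.Dict.values]
      exact List.mem_map_of_mem hitem
    exact List.mem_flatten.mpr ⟨l, hl, hx⟩

-- ---- measure bookkeeping over one level ----
lemma pvM_level (g : PySem.Dict Int (List Int)) (v v' : PySem.Dict Int Int)
    (Nlist flat : List Int) (d : Int)
    (hN_mem : ∀ x, x ∈ Nlist ↔ x ∈ flat ∧ v.get? x = none)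
    (hN_nodup : Nlist.Nodup)
    (hflat : ∀ x ∈ flat, x ∈ pvPool g)
    (hv' : ∀ x, v'.get? x = if v.get? x = none then (if x ∈ flat then some d else none) else v.get? x) :
    pvM g v' + Nlist.length = pvM g v := by
  have hchar : ∀ x, (v'.get? x = none) ↔ (v.get? x = none ∧ x ∉ flat) := by
    intro x
    rw [hv']
    by_cases hn : v.get? x = none
    · rw [if_pos hn]
      by_cases hm : x ∈ flat <;> simp [hm, hn]
    · rw [if_neg hn]; simp [hn]
  have hsub : Nlist.toFinset ⊆ (pvPool g).filter (fun x => v.get? x = none) := by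
    intro x hx
    rw [List.mem_toFinset] at hx
    obtain ⟨h1, h2⟩ := (hN_mem x).mp hx
    rw [Finset.mem_filter]
    exact ⟨hflat x h1, h2⟩
  have hset : (pvPool g).filter (fun x => v'.get? x = none) =
      ((pvPool g).filter (fun x => v.get? x = none)) \ Nlist.toFinset := by
    ext x
    rw [Finset.mem_sdiff, Finset.mem_filter, Finset.mem_filter, List.mem_toFinset, hchar x,
      hN_mem x]
    constructor
    · rintro ⟨hp, hn, hf⟩; exact ⟨⟨hp, hn⟩, fun h => hf h.1⟩
    · rintro ⟨⟨hp, hn⟩, hf⟩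
      exact ⟨hp, hn, fun h => hf ⟨h, hn⟩⟩
  have hcard : Nlist.toFinset.card = Nlist.length := List.toFinset_card_of_nodup hN_nodup
  have hle := Finset.card_le_card hsub
  rw [hcard] at hle
  rw [pvM, pvM, hset, Finset.card_sdiff, Finset.inter_eq_left.mpr hsub, hcard]
  omega

-- ---- the simulation: heap-Dijkstra and level-BFS agree pointwise ----
lemma pvMain (g : PySem.Dict Int (List Int)) :
    ∀ (fB : Nat) (d : Int) (vA vB : PySem.Dict Int Int) (FA FB : List Int)
      (q : List (Int × Int)) (fA : Nat),
      (∀ x, vA.get? x = vB.get? x) →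
      q.Perm (FA.map (fun u => (d, u))) →
      FA.Nodup → FB.Nodup → (∀ x, x ∈ FA ↔ x ∈ FB) →
      (∀ x w, vA.get? x = some w → w ≤ d) →
      FA.length + pvM g vB ≤ fA →
      (FB ≠ [] → pvM g vB + 1 ≤ fB) →
      ∀ x, (pvLoopA g fA vA q).get? x = (pvLoopB g fB vB FB d).get? x := by
  intro fB
  induction fB with
  | zero =>
    intro d vA vB FA FB q fA hvv hq hndA hndB hset hv hfA hfB x
    have hFB : FB = [] := by
      by_contra h
      have := hfB h
      omega
    subst hFB
    have hFA : FA = [] := by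
      rw [List.eq_nil_iff_forall_not_mem]
      intro y hy
      exact (List.not_mem_nil (a := y)).elim ((hset y).mp hy)
    subst hFA
    have hqnil : q = [] := by simpa using hq
    subst hqnil
    rw [pvLoopA_nil, pvLoopB]
    exact hvv x
  | succ f ihf =>
    intro d vA vB FA FB q fA hvv hq hndA hndB hset hv hfA hfB x
    by_cases hFB : FB = []
    · subst hFB
      have hFA : FA = [] := by
        rw [List.eq_nil_iff_forall_not_mem]
        intro y hy
        exact (List.not_mem_nil (a := y)).elim ((hset y).mp hy)
      subst hFA
      have hqnil : q = [] := by simpa using hq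
      subst hqnil
      rw [pvLoopA_nil]
      simp only [pvLoopB, List.isEmpty_nil, if_true]
      exact hvv x
    · -- a non-empty level
      have hfA1 : FA.length ≤ fA := by omega
      -- A processes the level
      have hv' : ∀ y w, vA.get? y = some w → w ≤ d + 1 := by
        intro y w hy; have := hv y w hy; omega
      obtain ⟨us, q', hus, hloopA, hq'⟩ :=
        pvLoopA_level g d FA.length FA vA [] q (fA - FA.length) rfl (by simpa using hq)
          (by simp) hv'
      rw [Nat.add_sub_cancel' hfA1] at hloopA
      -- B processes the level
      have hloopB : pvLoopB g (f + 1) vB FB d =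
          pvLoopB g f (pvB1 g (d + 1) vB FB).1 (pvB1 g (d + 1) vB FB).2 (d + 1) := by
        have hne : FB.isEmpty = false := by
          cases FB with
          | nil => exact absurd rfl hFB
          | cons a l => rfl
        simp only [pvLoopB, hne, Bool.false_eq_true, if_false]
        rw [pv_foldl_flatMap]
        rfl
      set VA := (pvB1 g (d + 1) vA us).1 with hVA
      set NA := (pvB1 g (d + 1) vA us).2 with hNA
      set VB := (pvB1 g (d + 1) vB FB).1 with hVB
      set NB := (pvB1 g (d + 1) vB FB).2 with hNB
      -- flat membership agrees between the two frontiers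
      have hflatmem : ∀ y, y ∈ us.flatMap (pvAdj g) ↔ y ∈ FB.flatMap (pvAdj g) := by
        intro y
        rw [List.mem_flatMap, List.mem_flatMap]
        constructor
        · rintro ⟨u, hu, hy⟩; exact ⟨u, (hset u).mp (hus.mem_iff.mp hu), hy⟩
        · rintro ⟨u, hu, hy⟩; exact ⟨u, hus.mem_iff.mpr ((hset u).mpr hu), hy⟩
      -- pointwise equality of the two new dicts
      have hvv' : ∀ y, VA.get? y = VB.get? y := by
        intro y
        rw [hVA, hVB, pvB1, pvB1, pvAdd_fold_get?, pvAdd_fold_get?, hvv y]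
        by_cases hn : vB.get? y = none
        · rw [if_pos hn, if_pos hn]
          by_cases hm : y ∈ us.flatMap (pvAdj g)
          · rw [if_pos hm, if_pos ((hflatmem y).mp hm)]
          · rw [if_neg hm, if_neg (fun h => hm ((hflatmem y).mpr h))]
        · rw [if_neg hn, if_neg hn]
      have hmemA : ∀ y, y ∈ NA ↔ y ∈ us.flatMap (pvAdj g) ∧ vA.get? y = none := by
        intro y; rw [hNA, pvB1]; exact pvAdd_fold_mem _ _ _ _
      have hmemB : ∀ y, y ∈ NB ↔ y ∈ FB.flatMap (pvAdj g) ∧ vB.get? y = none := by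
        intro y; rw [hNB, pvB1]; exact pvAdd_fold_mem _ _ _ _
      have hsetN : ∀ y, y ∈ NA ↔ y ∈ NB := by
        intro y
        rw [hmemA, hmemB, ← hflatmem y, hvv y]
      have hndNA : NA.Nodup := by rw [hNA, pvB1]; exact pvAdd_fold_nodup _ _ _
      have hndNB : NB.Nodup := by rw [hNB, pvB1]; exact pvAdd_fold_nodup _ _ _
      have hlenN : NA.length = NB.length :=
        ((List.perm_ext_iff_of_nodup hndNA hndNB).mpr hsetN).length_eq
      -- value bound for the next level
      have hvA' : ∀ y w, VA.get? y = some w → w ≤ d + 1 := by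
        intro y w hy
        rw [hVA, pvB1, pvAdd_fold_get?] at hy
        by_cases hn : vA.get? y = none
        · rw [if_pos hn] at hy
          by_cases hm : y ∈ us.flatMap (pvAdj g)
          · rw [if_pos hm] at hy; injection hy with hy; omega
          · rw [if_neg hm] at hy; cases hy
        · rw [if_neg hn] at hy; exact hv' y w hy
      -- measure bookkeeping
      have hflatpool : ∀ y ∈ FB.flatMap (pvAdj g), y ∈ pvPool g := by
        intro y hy
        obtain ⟨u, _, hy⟩ := List.mem_flatMap.mp hy
        rw [pvPool, List.mem_toFinset]
        exact pv_mem_getD_values g u y hy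
      have hMstep : pvM g VB + NB.length = pvM g vB := by
        refine pvM_level g vB VB NB (FB.flatMap (pvAdj g)) (d + 1) hmemB hndNB hflatpool ?_
        intro y
        rw [hVB, pvB1, pvAdd_fold_get?]
      -- apply the induction hypothesis
      have hfBv := hfB hFB
      have hfA' : NA.length + pvM g VB ≤ fA - FA.length := by
        rw [hlenN]; omega
      have hfB' : NB ≠ [] → pvM g VB + 1 ≤ f := by
        intro hNB0
        have h2 : 0 < NB.length := List.length_pos_of_ne_nil hNB0
        omega
      have hrec := ihf (d + 1) VA VB NA NB q' (fA - FA.length) hvv'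
        (by simpa using hq') hndNA hndNB hsetN hvA' hfA' hfB' x
      rw [hloopA, hloopB]
      exact hrec

-- ---- every stored neighbour is a road endpoint ----
lemma pv_values_insert_append (g : PySem.Dict Int (List Int)) (k a x : Int)
    (hx : x ∈ (g.insert k (g.getD k [] ++ [a])).values.flatten) :
    x ∈ g.values.flatten ∨ x = a := by
  obtain ⟨l, hl, hxl⟩ := List.mem_flatten.mp hx
  rcases PySem.Dict.mem_values_insert _ _ _ _ hl with rfl | hl
  · rcases List.mem_append.mp hxl with h1 | h1
    · exact Or.inl (pv_mem_getD_values g k x h1)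
    · exact Or.inr (List.mem_singleton.mp h1)
  · exact Or.inl (List.mem_flatten.mpr ⟨l, hl, hxl⟩)

lemma pvAdjStep_values (g : PySem.Dict Int (List Int)) (r : Int × Int) (x : Int)
    (hx : x ∈ (pvAdjStep g r).values.flatten) :
    x ∈ g.values.flatten ∨ x = r.1 ∨ x = r.2 := by
  simp only [pvAdjStep] at hx
  rcases pv_values_insert_append _ _ _ _ hx with h1 | h1
  · rcases pv_values_insert_append _ _ _ _ h1 with h2 | h2
    · exact Or.inl h2
    · exact Or.inr (Or.inr h2)
  · exact Or.inr (Or.inl h1)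

lemma pv_values_sub (roads : List (Int × Int)) :
    ∀ (g0 : PySem.Dict Int (List Int)) (x : Int),
      x ∈ (roads.foldl pvAdjStep g0).values.flatten →
      x ∈ g0.values.flatten ∨ x ∈ roads.map Prod.fst ++ roads.map Prod.snd := by
  induction roads with
  | nil => intro g0 x hx; exact Or.inl hx
  | cons r roads ih =>
    intro g0 x hx
    rw [List.foldl_cons] at hx
    rcases ih (pvAdjStep g0 r) x hx with hx | hx
    · rcases pvAdjStep_values g0 r x hx with h | h | h
      · exact Or.inl h
      · exact Or.inr (by simp [h])
      · exact Or.inr (by simp [h])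
    · refine Or.inr ?_
      rcases List.mem_append.mp hx with h | h
      · exact List.mem_append_left _ (List.mem_cons_of_mem _ h)
      · exact List.mem_append_right _ (List.mem_cons_of_mem _ h)

lemma pv_empty_values_flatten :
    (PySem.Dict.empty : PySem.Dict Int (List Int)).values.flatten = [] := rfl

lemma pvM_bound (roads : List (Int × Int)) (v : PySem.Dict Int Int) :
    pvM (roads.foldl pvAdjStep PySem.Dict.empty) v ≤ 2 * roads.length := by
  have hsub : pvPool (roads.foldl pvAdjStep PySem.Dict.empty) ⊆
      (roads.map Prod.fst ++ roads.map Prod.snd).toFinset := by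
    intro x hx
    rw [pvPool, List.mem_toFinset] at hx
    rcases pv_values_sub roads PySem.Dict.empty x hx with h | h
    · rw [pv_empty_values_flatten] at h; simp at h
    · rwa [List.mem_toFinset]
  have h1 : pvM (roads.foldl pvAdjStep PySem.Dict.empty) v ≤
      (pvPool (roads.foldl pvAdjStep PySem.Dict.empty)).card :=
    Finset.card_le_card (Finset.filter_subset _ _)
  have h2 := Finset.card_le_card hsub
  have h3 := List.toFinset_card_le (roads.map Prod.fst ++ roads.map Prod.snd)
  rw [List.length_append, List.length_map, List.length_map] at h3
  omega

-- ===== VERDICT (by name: the statement is the Claim_ definition above) =====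
theorem solution_spec : Claim_equal_solution := by
  unfold Claim_equal_solution Spec_solution
  intro n roads sources destination _
  simp only [solution, solution_alt]
  have hfoldmap := PySem.List.foldl_append_singleton_eq_map
    (fun s => match (pvLoopA (roads.foldl pvAdjStep PySem.Dict.empty)
      (2 * roads.length + 2) (PySem.Dict.empty.insert destination 0)
      [(0, destination)]).get? s with | some w => w | none => -1) sources []
  refine hfoldmap.trans ?_
  rw [List.nil_append]
  refine List.map_congr_left ?_
  intro s _
  have hv0 : ∀ (x w : Int), (PySem.Dict.empty.insert destination 0).get? x = some w → w ≤ 0 := by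
    intro x w hx
    by_cases hd : x = destination
    · subst hd; rw [PySem.Dict.get?_insert_self] at hx; injection hx with hx; omega
    · rw [PySem.Dict.get?_insert_of_ne _ _ hd] at hx
      rw [PySem.Dict.get?_empty] at hx; cases hx
  have hbound := pvM_bound roads (PySem.Dict.empty.insert destination 0)
  have hpt := pvMain (roads.foldl pvAdjStep PySem.Dict.empty) (2 * roads.length + 2) 0
    (PySem.Dict.empty.insert destination 0) (PySem.Dict.empty.insert destination 0)
    [destination] [destination] [(0, destination)] (2 * roads.length + 2)
    (fun _ => rfl) (by simp) (List.nodup_singleton _) (List.nodup_singleton _)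
    (fun _ => Iff.rfl) hv0 (by simp; omega) (fun _ => by omega) s
  rw [PySem.Dict.getD_eq_get?_getD, ← hpt]
  cases (pvLoopA (roads.foldl pvAdjStep PySem.Dict.empty) (2 * roads.length + 2)
      (PySem.Dict.empty.insert destination 0) [(0, destination)]).get? s <;> rfl
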